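-- pv_equiv track=rewrite | github.com/Zayrick/Light | script/TestDevice/config_generator_gui.py | _iter_cells
-- ===== SOURCE A (Python) =====
-- def _iter_cells(width: int, height: int, order: str):
--     if order == "row-major":
--         for y in range(height):
--             for x in range(width):
--                 yield x, y
--         return
--
--     if order == "serpentine-rows":
--         for y in range(height):
--             xs = range(width) if (y % 2 == 0) else range(width - 1, -1, -1)
--             for x in xs:
--                 yield x, y
--         return
--
--     if order == "col-major":
--         for x in range(width):
--             for y in range(height):
--                 yield x, y
--         return
--
--     if order == "serpentine-cols":
--         for x in range(width):
--             ys = range(height) if (x % 2 == 0) else range(height - 1, -1, -1)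
--             for y in ys:
--                 yield x, y
--         return
--
--     # Fallback.
--     for y in range(height):
--         for x in range(width):
--             yield x, y
-- ===== SOURCE B (Python) =====
-- def _iter_cells(width: int, height: int, order: str):
--     # Closed-form index arithmetic: one flat pass over k in range(width*height),
--     # recovering the cell from k by divmod instead of running nested loops.
--     if width <= 0 or height <= 0:
--         return
--     col = order in ("col-major", "serpentine-cols")
--     serp = order in ("serpentine-rows", "serpentine-cols")
--     inner = height if col else width
--     for k in range(width * height):
--         i, j = divmod(k, inner)
--         if serp and i % 2 == 1:
--             j = inner - 1 - j
--         yield (i, j) if col else (j, i)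
-- ===== Notes on version B (the rewrite author's own statement) =====
-- stated objective: alternative
-- what changed: Replaces A's five nested double loops (one per order plus fallback) by a single flat pass over k in range(width*height) that recovers each cell from k by divmod index arithmetic, flipping the remainder on odd serpentine passes.
import Mathlib
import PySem

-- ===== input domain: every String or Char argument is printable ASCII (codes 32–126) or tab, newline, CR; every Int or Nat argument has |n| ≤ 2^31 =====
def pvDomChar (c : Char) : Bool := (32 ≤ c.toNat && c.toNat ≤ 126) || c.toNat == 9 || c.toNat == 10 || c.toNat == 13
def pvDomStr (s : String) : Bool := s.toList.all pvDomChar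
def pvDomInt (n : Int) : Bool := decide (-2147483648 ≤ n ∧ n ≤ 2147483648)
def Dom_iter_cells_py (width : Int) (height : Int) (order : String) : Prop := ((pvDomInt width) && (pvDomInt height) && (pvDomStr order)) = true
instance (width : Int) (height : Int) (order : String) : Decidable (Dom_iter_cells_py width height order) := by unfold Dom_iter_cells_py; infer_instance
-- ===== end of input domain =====

-- B replaces A's five nested double loops by one flat pass over k in range(width*height),
-- recovering each cell from k by divmod (closed-form index arithmetic); objective: alternative.

-- ===== PORT A =====
def iter_cells_py (width : Int) (height : Int) (order : String) : List (Int × Int) :=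
  if order == "row-major" then
    (PySem.List.pyRange 0 height 1).flatMap (fun y =>
      (PySem.List.pyRange 0 width 1).map (fun x => (x, y)))
  else if order == "serpentine-rows" then
    (PySem.List.pyRange 0 height 1).flatMap (fun y =>
      let xs := if PySem.Int.mod y 2 == 0 then PySem.List.pyRange 0 width 1
                else PySem.List.pyRange (width - 1) (-1) (-1)
      xs.map (fun x => (x, y)))
  else if order == "col-major" then
    (PySem.List.pyRange 0 width 1).flatMap (fun x =>
      (PySem.List.pyRange 0 height 1).map (fun y => (x, y)))
  else if order == "serpentine-cols" then
    (PySem.List.pyRange 0 width 1).flatMap (fun x =>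
      let ys := if PySem.Int.mod x 2 == 0 then PySem.List.pyRange 0 height 1
                else PySem.List.pyRange (height - 1) (-1) (-1)
      ys.map (fun y => (x, y)))
  else
    (PySem.List.pyRange 0 height 1).flatMap (fun y =>
      (PySem.List.pyRange 0 width 1).map (fun x => (x, y)))

-- ===== PORT B =====
def iter_cells_py_alt (width : Int) (height : Int) (order : String) : List (Int × Int) :=
  if width ≤ 0 ∨ height ≤ 0 then []
  else
    let col := order == "col-major" || order == "serpentine-cols"
    let serp := order == "serpentine-rows" || order == "serpentine-cols"
    let inner := if col then height else width
    (PySem.List.pyRange 0 (width * height) 1).map (fun k =>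
      let i := PySem.Int.floordiv k inner
      let j0 := PySem.Int.mod k inner
      let j := if serp && (PySem.Int.mod i 2 == 1) then inner - 1 - j0 else j0
      if col then (i, j) else (j, i))

-- ===== PRECONDITION & SPEC =====
def Spec_iter_cells_py (width : Int) (height : Int) (order : String) (out : List (Int × Int)) : Prop := out = iter_cells_py_alt width height order
instance (width : Int) (height : Int) (order : String) (out : List (Int × Int)) : Decidable (Spec_iter_cells_py width height order out) := by unfold Spec_iter_cells_py; infer_instance

-- ===== CLAIM =====
def Claim_equal_iter_cells_py : Prop := ∀ (width : Int) (height : Int) (order : String), Dom_iter_cells_py width height order → Spec_iter_cells_py width height order (iter_cells_py width height order)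

-- ===== LEMMAS AND PROOFS =====

-- range(n-1, -1, -1).map f = range(n).map (fun j => f (n-1-j))
theorem pvRevMap {α : Type} (n : Int) (f : Int → α) :
    (PySem.List.pyRange (n - 1) (-1) (-1)).map f
      = (PySem.List.pyRange 0 n 1).map (fun j => f (n - 1 - j)) := by
  rw [PySem.List.pyRange_neg_one, PySem.List.pyRange_one]
  have : (n - 1 - (-1)).toNat = (n - 0).toNat := by omega
  rw [this]
  simp only [List.map_map]
  exact List.map_congr_left fun k _ => by simp

-- flattening lemma: nested loops = one flat pass with divmod, for 0 < n
theorem pvFlat {α : Type} (m : Nat) (n : Int) (hn : 0 < n) (g : Int → Int → α) :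
    (PySem.List.pyRange 0 (m : Int) 1).flatMap (fun i => (PySem.List.pyRange 0 n 1).map (g i))
      = (PySem.List.pyRange 0 ((m : Int) * n) 1).map
          (fun k => g (PySem.Int.floordiv k n) (PySem.Int.mod k n)) := by
  induction m with
  | zero => simp [PySem.List.pyRange_one_eq_nil]
  | succ m ih =>
    rw [show ((m + 1 : Nat) : Int) = (m : Int) + 1 by push_cast; ring,
        PySem.List.pyRange_one_succ_right (by positivity)]
    rw [List.flatMap_append, ih]
    have hsplit : PySem.List.pyRange 0 (((m : Int) + 1) * n) 1
        = PySem.List.pyRange 0 ((m : Int) * n) 1 ++ PySem.List.pyRange ((m : Int) * n) (((m : Int) + 1) * n) 1 := by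
      apply PySem.List.pyRange_one_append <;> nlinarith
    rw [hsplit, List.map_append]
    congr 1
    simp only [List.flatMap_cons, List.flatMap_nil, List.append_nil]
    rw [PySem.List.pyRange_one 0 n, PySem.List.pyRange_one ((m : Int) * n) (((m : Int) + 1) * n)]
    have he : (((m : Int) + 1) * n - (m : Int) * n).toNat = (n - 0).toNat := by
      congr 1; ring
    rw [he]
    simp only [List.map_map]
    apply List.map_congr_left
    intro k hk
    have hkr := List.mem_range.mp hk
    have hk' : (k : Int) < n := by omega
    have hk0 : (0 : Int) ≤ (k : Int) := by positivity
    simp only [Function.comp, zero_add]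
    have hd : PySem.Int.floordiv ((m : Int) * n + (k : Int)) n = (m : Int) := by
      rw [PySem.Int.floordiv_eq_ediv_of_pos hn,
        show (m : Int) * n + (k : Int) = (k : Int) + (m : Int) * n by ring,
        Int.add_mul_ediv_right _ _ (by omega : n ≠ 0), Int.ediv_eq_zero_of_lt hk0 hk']
      simp
    have hm2 : PySem.Int.mod ((m : Int) * n + (k : Int)) n = (k : Int) := by
      rw [PySem.Int.mod_eq_emod_of_pos hn,
        show (m : Int) * n + (k : Int) = (k : Int) + (m : Int) * n by ring,
        show (k : Int) + (m : Int) * n = (k : Int) + n * (m : Int) by ring,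
        Int.add_mul_emod_self_left, Int.emod_eq_of_lt hk0 hk']
    rw [hd, hm2]

-- i % 2 (Python) is 0 or 1
theorem pvMod2 (i : Int) : PySem.Int.mod i 2 = 0 ∨ PySem.Int.mod i 2 = 1 := by
  rw [PySem.Int.mod_eq_emod_of_pos (by norm_num : (0:Int) < 2)]
  omega

-- one generic branch: A's (possibly serpentine) nested loop = B's flat pass
theorem pvBranch {α : Type} (outer inner : Int) (ho : 0 < outer) (hi : 0 < inner)
    (serp : Bool) (g : Int → Int → α) :
    (PySem.List.pyRange 0 outer 1).flatMap (fun i =>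
        (if serp && (PySem.Int.mod i 2 == 1)
          then PySem.List.pyRange (inner - 1) (-1) (-1)
          else PySem.List.pyRange 0 inner 1).map (g i))
      = (PySem.List.pyRange 0 (outer * inner) 1).map (fun k =>
          let i := PySem.Int.floordiv k inner
          let j0 := PySem.Int.mod k inner
          let j := if serp && (PySem.Int.mod i 2 == 1) then inner - 1 - j0 else j0
          g i j) := by
  obtain ⟨m, hm⟩ : ∃ m : Nat, outer = (m : Int) := ⟨outer.toNat, by omega⟩
  subst hm
  refine Eq.trans ?_
    (pvFlat m inner hi (fun i j => g i (if serp && (PySem.Int.mod i 2 == 1) then inner - 1 - j else j)))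
  refine List.flatMap_congr ?_
  intro i _
  by_cases hs : serp && (PySem.Int.mod i 2 == 1)
  · simp only [hs, if_true, pvRevMap]
  · simp only [Bool.not_eq_true] at hs
    simp only [hs, Bool.false_eq_true, if_false]

-- everything is empty when width ≤ 0 or height ≤ 0
theorem pvEmptyA (width height : Int) (order : String) (h : width ≤ 0 ∨ height ≤ 0) :
    iter_cells_py width height order = [] := by
  unfold iter_cells_py
  rcases h with h | h <;>
    split_ifs <;>
    simp_all [PySem.List.pyRange_one_eq_nil, PySem.List.pyRange_neg_one_eq_nil,
      List.flatMap_eq_nil_iff] <;>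
    (try (intro _ _ <;> split_ifs <;>
      simp [PySem.List.pyRange_one_eq_nil (by omega : (height:Int) ≤ 0),
        PySem.List.pyRange_neg_one_eq_nil (by omega : (height:Int) - 1 ≤ -1)]))

-- i%2==0 vs i%2==1 branch swap
theorem pvIfSwap {α : Type} (i : Int) (a b : α) :
    (if PySem.Int.mod i 2 == 0 then a else b) = (if PySem.Int.mod i 2 == 1 then b else a) := by
  rcases pvMod2 i with h | h <;> rw [h] <;> simp

-- ===== VERDICT =====
theorem iter_cells_py_spec : Claim_equal_iter_cells_py := by
  intro width height order _
  unfold Spec_iter_cells_py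
  by_cases hwh : width ≤ 0 ∨ height ≤ 0
  · rw [pvEmptyA _ _ _ hwh]
    unfold iter_cells_py_alt
    rw [if_pos hwh]
  · push_neg at hwh
    obtain ⟨hw, hh⟩ := hwh
    unfold iter_cells_py iter_cells_py_alt
    rw [if_neg (show ¬(width ≤ 0 ∨ height ≤ 0) by omega)]
    by_cases h1 : order = "row-major"
    · subst h1
      simp only [String.reduceBEq, Bool.false_eq_true, eq_self_iff_true, if_true, if_false, Bool.or_self, Bool.false_or, Bool.or_false,
        Bool.false_and, Bool.true_and]
      rw [show width * height = height * width by ring]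
      have hb := pvBranch height width hh hw false (fun i j => (j, i))
      simp only [Bool.false_and, Bool.false_eq_true, if_false] at hb
      exact hb
    · by_cases h2 : order = "serpentine-rows"
      · subst h2
        simp only [String.reduceBEq, Bool.false_eq_true, eq_self_iff_true, if_true, if_false, Bool.or_self, Bool.false_or, Bool.or_false,
          Bool.false_and, Bool.true_and]
        rw [show width * height = height * width by ring]
        have hb := pvBranch height width hh hw true (fun i j => (j, i))
        simp only [Bool.true_and] at hb
        rw [← hb]
        refine List.flatMap_congr ?_
        intro y _
        rw [pvIfSwap]
      · by_cases h3 : order = "col-major"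
        · subst h3
          simp only [String.reduceBEq, Bool.false_eq_true, eq_self_iff_true, if_true, if_false, Bool.or_self, Bool.false_or, Bool.or_false,
            Bool.false_and, Bool.true_and]
          have hb := pvBranch width height hw hh false (fun i j => (i, j))
          simp only [Bool.false_and, Bool.false_eq_true, if_false] at hb
          exact hb
        · by_cases h4 : order = "serpentine-cols"
          · subst h4
            simp only [String.reduceBEq, Bool.false_eq_true, eq_self_iff_true, if_true, if_false, Bool.or_self, Bool.false_or, Bool.or_false,
              Bool.false_and, Bool.true_and]
            have hb := pvBranch width height hw hh true (fun i j => (i, j))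
            simp only [Bool.true_and] at hb
            rw [← hb]
            refine List.flatMap_congr ?_
            intro x _
            rw [pvIfSwap]
          · have e1 : (order == "row-major") = false := beq_eq_false_iff_ne.mpr h1
            have e2 : (order == "serpentine-rows") = false := beq_eq_false_iff_ne.mpr h2
            have e3 : (order == "col-major") = false := beq_eq_false_iff_ne.mpr h3
            have e4 : (order == "serpentine-cols") = false := beq_eq_false_iff_ne.mpr h4
            simp only [e1, e2, e3, e4, Bool.or_self, Bool.false_and, Bool.false_eq_true, if_false]
            rw [show width * height = height * width by ring]
            have hb := pvBranch height width hh hw false (fun i j => (j, i))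
            simp only [Bool.false_and, Bool.false_eq_true, if_false] at hb
            exact hb
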